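-- pv_equiv track=rewrite | github.com/fhgr/harvest | src/harvest/cleanup/forum_post.py | compute_common_suffix_count
-- ===== SOURCE A (Python) =====
-- def compute_common_suffix_count(post_list):
--     '''
--     Returns:
--     	int: The number of common suffix terms.
--     '''
--     confirmed_suffix_terms = []
--     for suffix_term in reversed(post_list[0].split(' ')):
--         new_suffix = ' ' + ' '.join([suffix_term] + confirmed_suffix_terms)
--         for post in post_list:
--             if not post.endswith(new_suffix):
--                 return len(confirmed_suffix_terms)
--         confirmed_suffix_terms.insert(0, suffix_term)
--
--     return len(confirmed_suffix_terms)
-- ===== SOURCE B (Python) =====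
-- def compute_common_suffix_count(post_list):
--     words = [post.split(' ') for post in post_list]
--     first = words[0]
--     limit = min(len(w) for w in words) - 1
--     count = 0
--     while count < limit:
--         term = first[len(first) - 1 - count]
--         if all(w[len(w) - 1 - count] == term for w in words):
--             count += 1
--         else:
--             break
--     return count
-- ===== Notes on version B (the rewrite author's own statement) =====
-- stated objective: alternative
-- what changed: B splits every post into its word list once and extends the common suffix one word at a time, comparing a single word per post per step against a precomputed strict length bound, instead of A's per-step rebuilding of the growing ' '-joined suffix string and endswith scans over every whole post.
import Mathlib
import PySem

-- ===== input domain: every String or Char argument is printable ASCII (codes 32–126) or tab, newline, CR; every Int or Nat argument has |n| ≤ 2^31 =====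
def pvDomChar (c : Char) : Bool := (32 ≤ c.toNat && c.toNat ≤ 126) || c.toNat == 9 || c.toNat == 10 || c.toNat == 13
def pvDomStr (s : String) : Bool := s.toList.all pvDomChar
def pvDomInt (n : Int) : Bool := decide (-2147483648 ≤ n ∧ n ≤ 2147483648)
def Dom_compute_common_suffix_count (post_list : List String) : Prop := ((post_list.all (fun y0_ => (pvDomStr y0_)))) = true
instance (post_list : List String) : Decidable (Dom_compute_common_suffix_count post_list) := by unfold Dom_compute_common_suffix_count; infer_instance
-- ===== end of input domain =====

-- B splits every post into its word list once and compares single words from the end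
-- (each post must be strictly longer than the match), instead of A's re-built suffix
-- strings and repeated endswith scans over whole posts; objective: alternative algorithm.

-- shared helper: post.split(' ') — the separator " " is nonempty, so Str.split? is never none
def pvSplitSp (s : String) : List String := (PySem.Str.split? s " ").getD []

-- ===== PORT A =====
def pvALoop (post_list : List String) (terms : List String) (rev : List String) : Int :=
  match rev with
  | [] => (terms.length : Int)
  | suffix_term :: rest =>
    let new_suffix := " " ++ PySem.Str.join " " (suffix_term :: terms)
    if post_list.all (fun post => PySem.Str.endswith post new_suffix) then
      pvALoop post_list (suffix_term :: terms) rest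
    else (terms.length : Int)

def compute_common_suffix_count (post_list : List String) : Int :=
  match post_list with
  | [] => 0  -- Python raises IndexError on []; excluded by Pre_
  | p0 :: _ => pvALoop post_list [] (pvSplitSp p0).reverse

-- ===== PORT B =====
def pvBLoop (words : List (List String)) (first : List String) (limit : Nat) (count : Nat) : Nat :=
  if h : count < limit then
    let term := first.getD (first.length - 1 - count) ""
    if words.all (fun w => w.getD (w.length - 1 - count) "" == term) then
      pvBLoop words first limit (count + 1)
    else count
  else count
termination_by limit - count

def compute_common_suffix_count_alt (post_list : List String) : Int :=
  match post_list with
  | [] => 0  -- words[0] raises IndexError in Python on []; excluded by Pre_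
  | _ :: _ =>
    let words := post_list.map pvSplitSp
    let first := words.headD []
    let limit := ((words.map (fun w => w.length)).min?.getD 0) - 1
    ((pvBLoop words first limit 0 : Nat) : Int)

-- ===== PRECONDITION & SPEC =====
-- Pre_ excludes only the empty list, on which the Python A raises IndexError (post_list[0]).
def Pre_compute_common_suffix_count (post_list : List String) : Prop := post_list ≠ []
instance (post_list : List String) : Decidable (Pre_compute_common_suffix_count post_list) := by unfold Pre_compute_common_suffix_count; infer_instance

def pvWitness_compute_common_suffix_count : List String := ["hello world end", "bye world end"]

def Spec_compute_common_suffix_count (post_list : List String) (out : Int) : Prop := out = compute_common_suffix_count_alt post_list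
instance (post_list : List String) (out : Int) : Decidable (Spec_compute_common_suffix_count post_list out) := by unfold Spec_compute_common_suffix_count; infer_instance

-- ===== CLAIM (what is proved, stated in full; the proofs are below) =====
def Claim_equal_compute_common_suffix_count : Prop := ∀ (post_list : List String), Dom_compute_common_suffix_count post_list → Pre_compute_common_suffix_count post_list → Spec_compute_common_suffix_count post_list (compute_common_suffix_count post_list)

-- ===== LEMMAS AND PROOFS =====

lemma pvModHead_id (l : List (List Char)) (f : List Char → List Char) (hf : ∀ x, f x = x) :
    l.modifyHead f = l := by
  cases l <;> simp [hf]

-- PySem's splitOn with a one-character separator is core List.splitOn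
lemma pvSplitOn_go_eq (c : Char) (l cur : List Char) (acc : List (List Char)) (fuel : Nat) (hf : l.length ≤ fuel) :
    PySem.Chars.splitOn.go [c] fuel l cur acc
      = acc.reverse ++ (List.splitOn c l).modifyHead (cur.reverse ++ ·) := by
  induction l generalizing fuel cur acc with
  | nil =>
      rw [PySem.Chars.splitOn.go.eq_def]
      cases fuel <;> simp [List.splitOn, List.splitOnP_nil]
  | cons c' rest ih =>
      cases fuel with
      | zero => simp at hf
      | succ f =>
        rw [PySem.Chars.splitOn.go.eq_def]
        dsimp only
        simp only [List.length_cons] at hf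
        by_cases hc : c' = c
        · subst hc
          have hpre : [c'].isPrefixOf (c' :: rest) = true := by simp [List.isPrefixOf]
          rw [if_pos hpre]
          simp only [List.length_cons, List.length_nil, Nat.zero_add, List.drop_succ_cons, List.drop_zero]
          rw [ih [] (cur.reverse :: acc) f (by omega)]
          simp only [List.splitOn]
          rw [List.splitOnP_cons]
          simp only [beq_self_eq_true, if_pos]
          rw [pvModHead_id _ _ (by intro x; simp)]
          simp
        · have hpre : [c].isPrefixOf (c' :: rest) = false := by
            simp [List.isPrefixOf]; exact fun h => absurd h.symm hc
          rw [if_neg (by simp [hpre])]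
          rw [ih (c' :: cur) acc f (by omega)]
          simp only [List.splitOn]
          rw [List.splitOnP_cons]
          have hb : (c' == c) = false := by simp [hc]
          rw [hb]
          simp only [Bool.false_eq_true, if_false]
          rw [List.modifyHead_modifyHead]
          congr 1
          apply congrArg (fun f => List.modifyHead f _)
          funext x
          simp [Function.comp]

lemma pvSplitOn_eq (c : Char) (s : List Char) :
    PySem.Chars.splitOn s [c] = List.splitOn c s := by
  rw [PySem.Chars.splitOn, pvSplitOn_go_eq c s [] [] (s.length+1) (by omega)]
  rw [pvModHead_id _ _ (fun x => by simp)]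
  simp

-- pieces of splitOnP never contain a separator
lemma pvSplitOnP_free {α : Type} (p : α → Bool) (xs : List α) :
    ∀ l ∈ List.splitOnP p xs, ∀ x ∈ l, p x = false := by
  induction xs with
  | nil => intro l hl x hx; rw [List.splitOnP_nil] at hl; simp at hl; subst hl; simp at hx
  | cons a as ih =>
      intro l hl x hx
      rw [List.splitOnP_cons] at hl
      by_cases hp : p a = true
      · rw [if_pos hp] at hl
        rcases List.mem_cons.mp hl with h | h
        · subst h; simp at hx
        · exact ih l h x hx
      · rw [if_neg hp] at hl
        rcases h0 : List.splitOnP p as with _ | ⟨hd, tl⟩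
        · exact absurd h0 (List.splitOnP_ne_nil p as)
        · rw [h0] at hl
          simp only [List.modifyHead] at hl
          rcases List.mem_cons.mp hl with h | h
          · subst h
            rcases List.mem_cons.mp hx with h | h
            · subst h; exact Bool.eq_false_iff.mpr hp
            · exact ih hd (by rw [h0]; exact List.mem_cons_self) x h
          · exact ih l (by rw [h0]; exact List.mem_cons_of_mem _ h) x hx

-- intercalate over a cons / an append of two nonempty lists
lemma pvIntercalate_cons {α : Type} (c : α) (x : List α) (S : List (List α)) (hS : S ≠ []) :
    [c].intercalate (x :: S) = x ++ c :: [c].intercalate S := by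
  rcases S with _ | ⟨y, S'⟩
  · exact absurd rfl hS
  · simp [List.intercalate, List.intersperse_cons₂]

lemma pvIntercalate_append {α : Type} (c : α) (q S : List (List α)) (hq : q ≠ []) (hS : S ≠ []) :
    [c].intercalate (q ++ S) = [c].intercalate q ++ c :: [c].intercalate S := by
  induction q with
  | nil => exact absurd rfl hq
  | cons x q' ih =>
      rcases q' with _ | ⟨z, q''⟩
      · rw [List.singleton_append, pvIntercalate_cons c x S hS]
        simp [List.intercalate]
      · rw [List.cons_append, pvIntercalate_cons c x ((z :: q'') ++ S) (by simp),
            ih (by simp), pvIntercalate_cons c x (z :: q'') (by simp)]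
        simp

-- the heart: "s ends with ' ' + join(S)" ⟺ S is a proper suffix of s's word list
lemma pvEnds_core (s : List Char) (S : List (List Char)) (hS : S ≠ [])
    (hfree : ∀ l ∈ S, ' ' ∉ l) :
    ((' ' :: PySem.Chars.join [' '] S) <:+ s) ↔ ∃ q, q ≠ [] ∧ List.splitOn ' ' s = q ++ S := by
  have hjoin : PySem.Chars.join [' '] S = [' '].intercalate S := rfl
  constructor
  · rintro ⟨a, ha⟩
    refine ⟨List.splitOn ' ' a, List.splitOnP_ne_nil _ _, ?_⟩
    have : s = a ++ ' ' :: [' '].intercalate S := by rw [← ha, hjoin]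
    rw [this]
    simp only [List.splitOn]
    rw [List.splitOnP_append_cons _ _ _ ' ' (by simp)]
    congr 1
    have := List.splitOn_intercalate S ' ' hfree hS
    simpa [List.splitOn] using this
  · rintro ⟨q, hq, h⟩
    have hs : s = [' '].intercalate (q ++ S) := by
      rw [← h, List.intercalate_splitOn]
    rw [hs, pvIntercalate_append ' ' q S hq hS, hjoin]
    exact ⟨[' '].intercalate q, rfl⟩

-- Str-level bridge for pvSplitSp
lemma pvSplitSp_toList (s : String) :
    (pvSplitSp s).map String.toList = List.splitOn ' ' s.toList := by
  have h := PySem.Str.split?_map s " "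
  have hsep : (" " : String).toList = [' '] := rfl
  rw [hsep] at h
  rw [PySem.Chars.split?] at h
  simp only [List.isEmpty_cons] at h
  rw [if_neg (by simp)] at h
  cases hh : PySem.Str.split? s " " with
  | none => rw [hh] at h; simp at h
  | some w =>
      rw [hh] at h
      simp only [Option.map_some] at h
      have := Option.some.inj h
      simp [pvSplitSp, hh, this, pvSplitOn_eq]

lemma pvSplitSp_ne_nil (s : String) : pvSplitSp s ≠ [] := by
  intro h
  have := pvSplitSp_toList s
  rw [h] at this
  simp only [List.map_nil] at this
  exact List.splitOnP_ne_nil _ _ this.symm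

lemma pvSplitSp_free (s : String) : ∀ x ∈ pvSplitSp s, ' ' ∉ x.toList := by
  intro x hx hsp
  have hmem : x.toList ∈ (pvSplitSp s).map String.toList := List.mem_map_of_mem hx
  rw [pvSplitSp_toList] at hmem
  have := pvSplitOnP_free (fun c => c == ' ') s.toList x.toList hmem ' ' hsp
  simp at this

-- A's per-post check, characterized on word lists
lemma pvEndswith_iff (p : String) (S : List String) (hS : S ≠ [])
    (hfree : ∀ x ∈ S, ' ' ∉ x.toList) :
    (PySem.Str.endswith p (" " ++ PySem.Str.join " " S) = true)
      ↔ ∃ q, q ≠ [] ∧ pvSplitSp p = q ++ S := by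
  rw [PySem.Str.endswith_eq, PySem.Chars.endswith_iff]
  have htl : (" " ++ PySem.Str.join " " S).toList
      = ' ' :: PySem.Chars.join [' '] (S.map String.toList) := by
    rw [String.toList_append, PySem.Str.toList_join]; rfl
  rw [htl, pvEnds_core p.toList (S.map String.toList)
        (by simpa using hS)
        (by intro l hl; rcases List.mem_map.mp hl with ⟨x, hx, rfl⟩; exact hfree x hx)]
  constructor
  · rintro ⟨q, hq, h⟩
    rw [← pvSplitSp_toList] at h
    rcases List.map_eq_append_iff.mp h with ⟨a, b, hab, ha, hb⟩
    refine ⟨a, ?_, ?_⟩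
    · intro h0; rw [h0] at ha; simp only [List.map_nil] at ha; exact hq ha.symm
    · rw [hab]
      congr 1
      have hbS : b.map String.toList = S.map String.toList := hb
      exact List.map_injective_iff.mpr (fun a b h => String.toList_inj.mp h) hbS
  · rintro ⟨q, hq, h⟩
    refine ⟨q.map String.toList, by simpa using hq, ?_⟩
    rw [← pvSplitSp_toList, h, List.map_append]

-- extending a known common suffix by one word = a length bound + one positional equality
lemma pvSuffix_step (w terms : List String) (t : String) (q0 : List String)
    (hq0 : q0 ≠ []) (hw : w = q0 ++ terms) :
    (∃ q, q ≠ [] ∧ w = q ++ t :: terms)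
      ↔ (terms.length + 2 ≤ w.length ∧ w.getD (w.length - 1 - terms.length) "" = t) := by
  constructor
  · rintro ⟨q, hq, rfl⟩
    have hlq : 1 ≤ q.length := List.length_pos_iff.mpr hq
    have hidx : (q ++ t :: terms).length - 1 - terms.length = q.length := by
      simp only [List.length_append, List.length_cons]; omega
    refine ⟨by simp only [List.length_append, List.length_cons]; omega, ?_⟩
    rw [hidx, List.getD_eq_getElem?_getD]
    simp
  · rintro ⟨hlen, hget⟩
    have hlw := congrArg List.length hw
    simp only [List.length_append] at hlw
    have hlq0 : 2 ≤ q0.length := by omega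
    have hidx : w.length - 1 - terms.length = q0.length - 1 := by omega
    rw [hidx] at hget
    have hlast : q0.getLast hq0 = t := by
      rw [hw, List.getD_append _ _ _ _ (by omega)] at hget
      rw [List.getD_eq_getElem _ _ (by omega)] at hget
      rw [List.getLast_eq_getElem]
      exact hget
    refine ⟨q0.dropLast, ?_, ?_⟩
    · intro h0
      have := congrArg List.length h0
      simp only [List.length_dropLast, List.length_nil] at this
      omega
    · conv_lhs => rw [hw, ← List.dropLast_append_getLast hq0, hlast]
      simp

-- B's while-guard: count < min(lengths) - 1 ⟺ every word list is long enough
lemma pvMinLt (l : List Nat) (hne : l ≠ []) (k : Nat) :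
    (k < l.min?.getD 0 - 1) ↔ ∀ x ∈ l, k + 2 ≤ x := by
  cases hm : l.min? with
  | none => exact absurd (List.min?_eq_none_iff.mp hm) hne
  | some m =>
      rcases List.min?_eq_some_iff.mp hm with ⟨hmem, hle⟩
      simp only [Option.getD_some]
      constructor
      · intro h x hx
        have := hle x hx
        omega
      · intro h
        have := h m hmem
        omega

-- main simulation: A's loop equals B's loop under the invariant
lemma pvSim (p0 : String) (ps : List String) (rev terms : List String)
    (hF : pvSplitSp p0 = rev.reverse ++ terms)
    (hinv : ∀ p ∈ p0 :: ps, ∃ q, q ≠ [] ∧ pvSplitSp p = q ++ terms) :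
    pvALoop (p0 :: ps) terms rev
      = ((pvBLoop ((p0 :: ps).map pvSplitSp) (pvSplitSp p0)
            ((((p0 :: ps).map pvSplitSp).map (fun w => w.length)).min?.getD 0 - 1)
            terms.length : Nat) : Int) := by
  induction rev generalizing terms with
  | nil =>
      simp only [List.reverse_nil, List.nil_append] at hF
      rw [pvALoop, pvBLoop]
      rw [dif_neg]
      have hmem : (pvSplitSp p0).length ∈ ((p0 :: ps).map pvSplitSp).map (fun w => w.length) := by
        simp
      have hle := List.min?_getD_le_of_mem (k := 0) hmem
      have hpos : 1 ≤ (pvSplitSp p0).length := List.length_pos_iff.mpr (pvSplitSp_ne_nil p0)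
      rw [← hF]
      omega
  | cons t rest ih =>
      have hF' : pvSplitSp p0 = rest.reverse ++ t :: terms := by
        simpa using hF
      have hfreeS : ∀ x ∈ t :: terms, ' ' ∉ x.toList := by
        intro x hx
        exact pvSplitSp_free p0 x (by rw [hF']; exact List.mem_append_right _ hx)
      -- the value B compares against is t
      have hFt : (pvSplitSp p0).getD ((pvSplitSp p0).length - 1 - terms.length) "" = t := by
        rw [hF']
        have hidx : (rest.reverse ++ t :: terms).length - 1 - terms.length = rest.reverse.length := by
          simp only [List.length_append, List.length_cons]; omega
        rw [hidx, List.getD_eq_getElem?_getD]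
        simp
      -- per-post step equivalence
      have hpost : ∀ p ∈ p0 :: ps,
          ((PySem.Str.endswith p (" " ++ PySem.Str.join " " (t :: terms)) = true)
            ↔ (terms.length + 2 ≤ (pvSplitSp p).length ∧
               (pvSplitSp p).getD ((pvSplitSp p).length - 1 - terms.length) "" = t)) := by
        intro p hp
        rcases hinv p hp with ⟨q0, hq0, hw⟩
        rw [pvEndswith_iff p (t :: terms) (by simp) hfreeS]
        exact pvSuffix_step (pvSplitSp p) terms t q0 hq0 hw
      have hlimit : (terms.length < (((p0 :: ps).map pvSplitSp).map (fun w => w.length)).min?.getD 0 - 1)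
          ↔ ∀ p ∈ p0 :: ps, terms.length + 2 ≤ (pvSplitSp p).length := by
        rw [pvMinLt _ (by simp)]
        constructor
        · intro h p hp
          exact h (pvSplitSp p).length (by simp only [List.map_map, List.mem_map, Function.comp]; exact ⟨p, hp, rfl⟩)
        · intro h x hx
          simp only [List.map_map, List.mem_map, Function.comp] at hx
          rcases hx with ⟨p, hp, rfl⟩
          exact h p hp
      have hall : (((p0 :: ps).map pvSplitSp).all
            (fun w => w.getD (w.length - 1 - terms.length) ""
              == (pvSplitSp p0).getD ((pvSplitSp p0).length - 1 - terms.length) "") = true)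
          ↔ ∀ p ∈ p0 :: ps, (pvSplitSp p).getD ((pvSplitSp p).length - 1 - terms.length) "" = t := by
        rw [List.all_eq_true]
        constructor
        · intro h p hp
          have := h (pvSplitSp p) (List.mem_map_of_mem hp)
          rwa [hFt, beq_iff_eq] at this
        · intro h w hw
          rcases List.mem_map.mp hw with ⟨p, hp, rfl⟩
          rw [hFt, beq_iff_eq]
          exact h p hp
      have hcond : ((p0 :: ps).all (fun post => PySem.Str.endswith post (" " ++ PySem.Str.join " " (t :: terms))) = true)
          ↔ ((terms.length < (((p0 :: ps).map pvSplitSp).map (fun w => w.length)).min?.getD 0 - 1) ∧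
             (((p0 :: ps).map pvSplitSp).all
                (fun w => w.getD (w.length - 1 - terms.length) ""
                  == (pvSplitSp p0).getD ((pvSplitSp p0).length - 1 - terms.length) "") = true)) := by
        rw [List.all_eq_true, hlimit, hall]
        constructor
        · intro h
          constructor
          · intro p hp; exact ((hpost p hp).mp (h p hp)).1
          · intro p hp; exact ((hpost p hp).mp (h p hp)).2
        · rintro ⟨h1, h2⟩ p hp
          exact (hpost p hp).mpr ⟨h1 p hp, h2 p hp⟩
      rw [pvALoop]
      by_cases hc : (p0 :: ps).all (fun post => PySem.Str.endswith post (" " ++ PySem.Str.join " " (t :: terms))) = true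
      · rw [if_pos hc]
        rcases hcond.mp hc with ⟨h1, h2⟩
        rw [pvBLoop, dif_pos h1]
        simp only []
        rw [if_pos h2]
        have hrec := ih (t :: terms) hF' (fun p hp => by
          rcases ((hpost p hp).mp ((List.all_eq_true.mp hc) p hp)) with hstep
          rcases hinv p hp with ⟨q0, hq0, hw⟩
          exact (pvSuffix_step (pvSplitSp p) terms t q0 hq0 hw).mpr hstep)
        simpa using hrec
      · rw [if_neg hc]
        by_cases h1 : terms.length < (((p0 :: ps).map pvSplitSp).map (fun w => w.length)).min?.getD 0 - 1
        · rw [pvBLoop, dif_pos h1]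
          simp only []
          rw [if_neg (fun h2 => hc (hcond.mpr ⟨h1, h2⟩))]
        · rw [pvBLoop, dif_neg h1]

-- ===== VERDICT (by name: the statement is the Claim_ definition above) =====
theorem compute_common_suffix_count_spec : Claim_equal_compute_common_suffix_count := by
  intro post_list _ hpre
  match post_list with
  | [] => exact absurd rfl hpre
  | p0 :: ps =>
    show pvALoop (p0 :: ps) [] (pvSplitSp p0).reverse = _
    rw [pvSim p0 ps (pvSplitSp p0).reverse [] (by simp) (fun p _ => ⟨pvSplitSp p, pvSplitSp_ne_nil p, by simp⟩)]
    simp [compute_common_suffix_count_alt]
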